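-- pv_equiv track=rewrite | github.com/kkitokki/15zizo | programmers/K/220121_khj1.py | solution
-- ===== SOURCE A (Python) =====
-- def solution(answers):
--     # 찍는방식 정의
--     a = [1, 2, 3, 4, 5]
--     b = [2, 1, 2, 3, 2, 4, 2, 5]
--     c = [3, 3, 1, 1, 2, 2, 4, 4, 5, 5]
--
--     # 맞힌 갯수 정의
--     count_a, count_b, count_c = 0, 0, 0
--     answer = []
--
--     # 정답 수만큼 for문
--     for i in range(0, len(answers)):
--
--         # 찍는 방식의 문제번호가 갯수 넘었을때 회귀, 찍기 갯수만큼 나누고 나머지 찾기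
--         if answers[i] == a[i % len(a)]:
--             count_a += 1
--         if answers[i] == b[i % len(b)]:
--             count_b += 1
--         if answers[i] == c[i % len(c)]:
--             count_c += 1
--
--     max_count = max(count_a, count_b, count_c)
--     # 최다정답자? = if문. 동점자 분류 위해 3번 반복
--     if max_count == count_a:
--         answer.append(1)
--     if max_count == count_b:
--         answer.append(2)
--     if max_count == count_c:
--         answer.append(3)
--
--     return answer
-- ===== SOURCE B (Python) =====
-- def solution(answers):
--     # The three patterns have periods 5, 8 and 10, all dividing 40: build one
--     # histogram of (position mod 40, answer) pairs in a single pass, then score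
--     # each pattern by 40 table lookups instead of rescanning the answers.
--     hist = {}
--     for i, x in enumerate(answers):
--         k = (i % 40, x)
--         hist[k] = hist.get(k, 0) + 1
--     patterns = [
--         [1, 2, 3, 4, 5],
--         [2, 1, 2, 3, 2, 4, 2, 5],
--         [3, 3, 1, 1, 2, 2, 4, 4, 5, 5],
--     ]
--     scores = [sum(hist.get((r, p[r % len(p)]), 0) for r in range(40))
--               for p in patterns]
--     best = max(scores)
--     return [k + 1 for k, s in enumerate(scores) if s == best]
-- ===== Notes on version B (the rewrite author's own statement) =====
-- stated objective: alternative
-- what changed: Replaces A's fused three-counter scan with a one-pass histogram keyed by (index mod 40, answer) (40 = lcm of the pattern periods 5, 8, 10); each pattern's score is then a sum of 40 histogram lookups, and the result is the 1-based indices of the maximal scores.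
import Mathlib
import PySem

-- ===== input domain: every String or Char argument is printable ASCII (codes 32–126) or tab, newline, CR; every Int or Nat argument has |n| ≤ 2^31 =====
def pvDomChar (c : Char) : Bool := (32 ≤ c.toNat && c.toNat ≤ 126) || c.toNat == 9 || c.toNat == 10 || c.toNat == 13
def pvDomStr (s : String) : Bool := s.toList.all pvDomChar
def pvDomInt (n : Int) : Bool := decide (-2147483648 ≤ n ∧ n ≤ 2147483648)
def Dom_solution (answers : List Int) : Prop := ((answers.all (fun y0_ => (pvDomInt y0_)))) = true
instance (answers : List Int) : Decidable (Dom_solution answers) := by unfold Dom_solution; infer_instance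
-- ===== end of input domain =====

-- B replaces A's fused three-counter scan of the answers by a one-pass histogram of
-- (index mod 40, answer) pairs (40 = lcm of the pattern periods 5, 8, 10), scoring each
-- pattern by 40 table lookups; same return value, including [] ↦ [1,2,3] (alternative).

-- ===== PORT A =====
-- one fused loop over range(len(answers)) carrying the three counters; answers[i] with
-- 0 ≤ i < len is always in range, so pyGetD with default 0 is exact here
def solution (answers : List Int) : List Int :=
  let a : List Int := [1, 2, 3, 4, 5]
  let b : List Int := [2, 1, 2, 3, 2, 4, 2, 5]
  let c : List Int := [3, 3, 1, 1, 2, 2, 4, 4, 5, 5]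
  let counts :=
    (PySem.List.pyRange 0 answers.length 1).foldl
      (fun (s : Int × Int × Int) i =>
        (if PySem.List.pyGetD answers i 0 = PySem.List.pyGetD a (PySem.Int.mod i (a.length : Int)) 0 then s.1 + 1 else s.1,
         if PySem.List.pyGetD answers i 0 = PySem.List.pyGetD b (PySem.Int.mod i (b.length : Int)) 0 then s.2.1 + 1 else s.2.1,
         if PySem.List.pyGetD answers i 0 = PySem.List.pyGetD c (PySem.Int.mod i (c.length : Int)) 0 then s.2.2 + 1 else s.2.2))
      ((0 : Int), (0 : Int), (0 : Int))
  let maxCount := max (max counts.1 counts.2.1) counts.2.2   -- Python max(x, y, z) is left-nested binary max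
  let ans0 : List Int := []
  let ans1 := if maxCount = counts.1 then ans0 ++ [1] else ans0
  let ans2 := if maxCount = counts.2.1 then ans1 ++ [2] else ans1
  if maxCount = counts.2.2 then ans2 ++ [3] else ans2

-- ===== PORT B =====
-- hist[k] = hist.get(k, 0) + 1 with k = (i % 40, x); then each score is
-- sum(hist.get((r, p[r % len(p)]), 0) for r in range(40))
def solution_alt (answers : List Int) : List Int :=
  let hist :=
    (PySem.List.enumerate answers).foldl
      (fun (d : PySem.Dict (Int × Int) Int) q =>
        d.insert (PySem.Int.mod q.1 40, q.2) (d.getD (PySem.Int.mod q.1 40, q.2) 0 + 1))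
      PySem.Dict.empty
  let patterns : List (List Int) := [[1, 2, 3, 4, 5], [2, 1, 2, 3, 2, 4, 2, 5], [3, 3, 1, 1, 2, 2, 4, 4, 5, 5]]
  let scores := patterns.map (fun p =>
    (PySem.List.pyRange 0 40 1).foldl
      (fun acc r => acc + hist.getD (r, PySem.List.pyGetD p (PySem.Int.mod r (p.length : Int)) 0) 0) 0)
  let best := (PySem.List.max? scores (fun y => y)).getD 0   -- scores has 3 elements, so max? is some
  ((PySem.List.enumerate scores).filter (fun q => q.2 == best)).map (fun q => q.1 + 1)

-- ===== PRECONDITION & SPEC =====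
def Spec_solution (answers : List Int) (out : List Int) : Prop := out = solution_alt answers
instance (answers : List Int) (out : List Int) : Decidable (Spec_solution answers out) := by unfold Spec_solution; infer_instance

-- ===== CLAIM (what is proved, stated in full; the proofs are below) =====
def Claim_equal_solution : Prop := ∀ (answers : List Int), Dom_solution answers → Spec_solution answers (solution answers)

-- ===== LEMMAS AND PROOFS =====

-- summing an indicator over a duplicate-free list containing m picks out c
lemma pv_sum_single (l : List Int) (m c : Int) (hm : m ∈ l) (hnd : l.Nodup) :
    (l.map (fun r => if r = m then c else 0)).sum = c := by
  induction l with
  | nil => cases hm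
  | cons x t ih =>
    rcases List.nodup_cons.mp hnd with ⟨hx, hnd'⟩
    by_cases hxm : x = m
    · subst hxm
      have hz : ∀ y ∈ t.map (fun r => if r = x then c else 0), y = 0 := by
        intro y hy
        rcases List.mem_map.mp hy with ⟨r, hr, rfl⟩
        have : r ≠ x := fun h' => hx (h' ▸ hr)
        simp [this]
      simp [List.sum_eq_zero hz]
    · have hm' : m ∈ t := by
        rcases List.mem_cons.mp hm with h | h
        · exact absurd h.symm hxm
        · exact h
      simp [hxm, ih hm' hnd']

-- summing per-residue histogram counts over range(40) recovers one countP over the pairs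
lemma pv_sum_count (g : Int → Int) (L : List (Int × Int)) :
    ((PySem.List.pyRange 0 40 1).map
        (fun r => (((L.map (fun q : Int × Int => (PySem.Int.mod q.1 40, q.2))).count (r, g r) : Nat) : Int))).sum
      = ((L.countP (fun q => q.2 == g (PySem.Int.mod q.1 40)) : Nat) : Int) := by
  induction L with
  | nil => simp
  | cons q L ih =>
    have hcnt : ∀ r : Int,
        ((((q :: L).map (fun q : Int × Int => (PySem.Int.mod q.1 40, q.2))).count (r, g r) : Nat) : Int)
          = (((L.map (fun q : Int × Int => (PySem.Int.mod q.1 40, q.2))).count (r, g r) : Nat) : Int)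
            + (if ((PySem.Int.mod q.1 40, q.2) : Int × Int) = (r, g r) then 1 else 0) := by
      intro r
      rw [List.map_cons, List.count_cons]
      push_cast
      split_ifs with h1 h2 h2 <;> simp_all
    simp only [hcnt, PySem.List.sum_map_add_int, ih]
    have hnd : (PySem.List.pyRange 0 40 1).Nodup := by decide
    have hmem : PySem.Int.mod q.1 40 ∈ PySem.List.pyRange 0 40 1 :=
      PySem.List.mem_pyRange_one.mpr
        ⟨PySem.Int.mod_nonneg _ (by norm_num), PySem.Int.mod_lt _ (by norm_num)⟩
    have hfun : (fun r : Int => if ((PySem.Int.mod q.1 40, q.2) : Int × Int) = (r, g r) then (1 : Int) else 0)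
        = fun r : Int => if r = PySem.Int.mod q.1 40
            then (if q.2 = g (PySem.Int.mod q.1 40) then (1 : Int) else 0) else 0 := by
      funext r
      by_cases h : r = PySem.Int.mod q.1 40
      · subst h; simp [Prod.ext_iff]
      · have hmod : PySem.Int.mod q.1 40 = q.1 % 40 :=
          PySem.Int.mod_eq_emod_of_pos (by norm_num)
        have h1 : ¬(q.1 % 40 = r ∧ q.2 = g r) := fun hh => h (hmod ▸ hh.1.symm)
        have h2 : ¬r = q.1 % 40 := fun hh => h (hmod ▸ hh)
        simp [h1, h2]
    rw [hfun, pv_sum_single _ _ _ hmem hnd, List.countP_cons]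
    push_cast
    split_ifs with h1 h2 h2 <;> simp_all

-- mod by a period dividing 40 factors through mod 40
lemma pv_mod_mod (i l : Int) (hl : 0 < l) (hd : l ∣ 40) :
    PySem.Int.mod (PySem.Int.mod i 40) l = PySem.Int.mod i l := by
  rw [PySem.Int.mod_eq_emod_of_pos hl, PySem.Int.mod_eq_emod_of_pos (show (0:Int) < 40 by norm_num),
    PySem.Int.mod_eq_emod_of_pos hl, Int.emod_emod_of_dvd _ hd]

-- B's 40-lookup score of one pattern equals A's direct per-index count for that pattern
lemma pv_score_eq (answers : List Int) (p : List Int) (hl : 0 < (p.length : Int))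
    (hd : ((p.length : Int)) ∣ 40) :
    (PySem.List.pyRange 0 40 1).foldl
      (fun acc r => acc +
        ((PySem.List.enumerate answers).foldl
          (fun (d : PySem.Dict (Int × Int) Int) q =>
            d.insert (PySem.Int.mod q.1 40, q.2) (d.getD (PySem.Int.mod q.1 40, q.2) 0 + 1))
          PySem.Dict.empty).getD (r, PySem.List.pyGetD p (PySem.Int.mod r (p.length : Int)) 0) 0) 0
    = (PySem.List.pyRange 0 answers.length 1).foldl
        (fun acc i =>
          if PySem.List.pyGetD answers i 0 = PySem.List.pyGetD p (PySem.Int.mod i (p.length : Int)) 0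
          then acc + 1 else acc) 0 := by
  -- the histogram loop is the counter of the mapped keys
  have hhist :
      (PySem.List.enumerate answers).foldl
        (fun (d : PySem.Dict (Int × Int) Int) q =>
          d.insert (PySem.Int.mod q.1 40, q.2) (d.getD (PySem.Int.mod q.1 40, q.2) 0 + 1))
        PySem.Dict.empty
      = PySem.Dict.counter ((PySem.List.enumerate answers).map
          (fun q : Int × Int => (PySem.Int.mod q.1 40, q.2))) := by
    rw [← PySem.Dict.foldl_insert_getD_add_one_eq_counter, List.foldl_map]
  rw [hhist, PySem.List.foldl_add]
  simp only [PySem.Dict.getD_counter, zero_add]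
  rw [pv_sum_count (fun r => PySem.List.pyGetD p (PySem.Int.mod r (p.length : Int)) 0) _]
  -- now rewrite the countP through the period division and back to the index loop
  have hpred : (fun q : Int × Int =>
        q.2 == PySem.List.pyGetD p (PySem.Int.mod (PySem.Int.mod q.1 40) (p.length : Int)) 0)
      = fun q : Int × Int => q.2 == PySem.List.pyGetD p (PySem.Int.mod q.1 (p.length : Int)) 0 := by
    funext q; rw [pv_mod_mod _ _ hl hd]
  rw [hpred, PySem.List.enumerate_eq_map_pyRange answers 0, List.countP_map]
  have hbool : (fun (acc : Int) (i : Int) =>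
        if PySem.List.pyGetD answers i 0 = PySem.List.pyGetD p (PySem.Int.mod i (p.length : Int)) 0
        then acc + 1 else acc)
      = fun (acc : Int) (i : Int) =>
        if (PySem.List.pyGetD answers i 0 == PySem.List.pyGetD p (PySem.Int.mod i (p.length : Int)) 0) = true
        then acc + 1 else acc := by
    funext acc i; simp
  rw [hbool, PySem.List.foldl_count_if]
  have hcomp : ((fun q : Int × Int => q.2 == PySem.List.pyGetD p (PySem.Int.mod q.1 (p.length : Int)) 0) ∘
        fun j : Int => (j, PySem.List.pyGetD answers j 0))
      = fun i : Int =>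
        PySem.List.pyGetD answers i 0 == PySem.List.pyGetD p (PySem.Int.mod i (p.length : Int)) 0 := rfl
  rw [hcomp]
  simp [PySem.List.len]

-- the tails of both programs agree, given the same three counters
lemma pv_tail_eq (x y z : Int) :
    (let m := max (max x y) z
     let ans0 : List Int := []
     let ans1 := if m = x then ans0 ++ [1] else ans0
     let ans2 := if m = y then ans1 ++ [2] else ans1
     if m = z then ans2 ++ [3] else ans2) =
    (let best := (PySem.List.max? [x, y, z] (fun v => v)).getD 0
     ((PySem.List.enumerate [x, y, z]).filter (fun q => q.2 == best)).map (fun q => q.1 + 1)) := by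
  simp only [PySem.List.max?_id_cons, List.foldl, Option.getD_some,
    PySem.List.enumerate_cons, PySem.List.enumerate_nil, List.filter_cons, List.filter_nil,
    beq_iff_eq]
  have hm : max (max x y) z = x ∨ max (max x y) z = y ∨ max (max x y) z = z := by omega
  generalize hM : max (max x y) z = m at *
  rcases eq_or_ne m x with hx | hx <;> rcases eq_or_ne m y with hy | hy <;>
    rcases eq_or_ne m z with hz | hz <;> simp_all <;>
      first | omega | (split_ifs <;> first | omega | simp_all)

-- ===== VERDICT (by name: the statement is the Claim_ definition above) =====
theorem solution_spec : Claim_equal_solution := by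
  intro answers _
  show solution answers = solution_alt answers
  unfold solution solution_alt
  simp only [List.map]
  rw [PySem.List.foldl_prod_mk
        (f := fun (n : Int) (i : Int) =>
          if PySem.List.pyGetD answers i 0 =
              PySem.List.pyGetD ([1, 2, 3, 4, 5] : List Int)
                (PySem.Int.mod i (([1, 2, 3, 4, 5] : List Int).length : Int)) 0 then n + 1 else n)
        (g := fun (s : Int × Int) (i : Int) =>
          (if PySem.List.pyGetD answers i 0 =
              PySem.List.pyGetD ([2, 1, 2, 3, 2, 4, 2, 5] : List Int)
                (PySem.Int.mod i (([2, 1, 2, 3, 2, 4, 2, 5] : List Int).length : Int)) 0 then s.1 + 1 else s.1,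
           if PySem.List.pyGetD answers i 0 =
              PySem.List.pyGetD ([3, 3, 1, 1, 2, 2, 4, 4, 5, 5] : List Int)
                (PySem.Int.mod i (([3, 3, 1, 1, 2, 2, 4, 4, 5, 5] : List Int).length : Int)) 0 then s.2 + 1 else s.2)),
      PySem.List.foldl_prod_mk
        (f := fun (n : Int) (i : Int) =>
          if PySem.List.pyGetD answers i 0 =
              PySem.List.pyGetD ([2, 1, 2, 3, 2, 4, 2, 5] : List Int)
                (PySem.Int.mod i (([2, 1, 2, 3, 2, 4, 2, 5] : List Int).length : Int)) 0 then n + 1 else n)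
        (g := fun (n : Int) (i : Int) =>
          if PySem.List.pyGetD answers i 0 =
              PySem.List.pyGetD ([3, 3, 1, 1, 2, 2, 4, 4, 5, 5] : List Int)
                (PySem.Int.mod i (([3, 3, 1, 1, 2, 2, 4, 4, 5, 5] : List Int).length : Int)) 0 then n + 1 else n)]
  rw [← pv_score_eq answers [1, 2, 3, 4, 5] (by norm_num) (by norm_num),
      ← pv_score_eq answers [2, 1, 2, 3, 2, 4, 2, 5] (by norm_num) (by norm_num),
      ← pv_score_eq answers [3, 3, 1, 1, 2, 2, 4, 4, 5, 5] (by norm_num) (by norm_num)]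
  exact pv_tail_eq _ _ _
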